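-- pv_equiv track=rewrite | github.com/AtenaAuto/Atena-agente- | core/atena_subagent_solver.py | _infer_failure_hypotheses
-- ===== SOURCE A (Python) =====
-- def _infer_failure_hypotheses(failures: list[dict[str, object]]) -> list[str]:
--     """Infer likely root causes from failure events without explicit explanation."""
--     hypotheses: list[str] = []
--     failure_blob = " ".join(
--         (
--             str(event.get("mission", ""))
--             + " "
--             + str(event.get("status", ""))
--             + " "
--             + str(event.get("error", ""))
--         ).lower()
--         for event in failures
--     )
--     if not failure_blob:
--         return hypotheses
--     if "latency" in failure_blob or "timeout" in failure_blob:
--         hypotheses.append("Hipótese: gargalo de desempenho/timeout; reduzir tamanho de lote e incluir retry exponencial.")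
--     if "auth" in failure_blob or "token" in failure_blob or "permission" in failure_blob:
--         hypotheses.append("Hipótese: falha de autenticação/permissão; validar credenciais e escopos antes da execução.")
--     if "schema" in failure_blob or "json" in failure_blob or "parse" in failure_blob:
--         hypotheses.append("Hipótese: inconsistência de contrato/dados; aplicar validação de schema e normalização de payload.")
--     if not hypotheses:
--         hypotheses.append("Hipótese: falha sistêmica genérica; ativar diagnóstico incremental por etapas para isolar causa raiz.")
--     return hypotheses
-- ===== SOURCE B (Python) =====
-- PERF_MSG = "Hipótese: gargalo de desempenho/timeout; reduzir tamanho de lote e incluir retry exponencial."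
-- AUTH_MSG = "Hipótese: falha de autenticação/permissão; validar credenciais e escopos antes da execução."
-- SCHEMA_MSG = "Hipótese: inconsistência de contrato/dados; aplicar validação de schema e normalização de payload."
-- GENERIC_MSG = "Hipótese: falha sistêmica genérica; ativar diagnóstico incremental por etapas para isolar causa raiz."
--
--
-- def _infer_failure_hypotheses(failures: list[dict[str, object]]) -> list[str]:
--     """Infer likely root causes: one pass over events with per-category flags."""
--     if not failures:
--         return []
--     perf = auth = schema = False
--     for event in failures:
--         text = (
--             str(event.get("mission", ""))
--             + " "
--             + str(event.get("status", ""))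
--             + " "
--             + str(event.get("error", ""))
--         ).lower()
--         perf = perf or "latency" in text or "timeout" in text
--         auth = auth or "auth" in text or "token" in text or "permission" in text
--         schema = schema or "schema" in text or "json" in text or "parse" in text
--     out = []
--     if perf:
--         out.append(PERF_MSG)
--     if auth:
--         out.append(AUTH_MSG)
--     if schema:
--         out.append(SCHEMA_MSG)
--     return out if out else [GENERIC_MSG]
-- ===== Notes on version B (the rewrite author's own statement) =====
-- stated objective: alternative
-- what changed: Replaces the single joined lowercase blob with a one-pass loop over events that maintains three per-category boolean flags tested against each event's own text; the output list is assembled from the flags afterwards.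
import Mathlib
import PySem

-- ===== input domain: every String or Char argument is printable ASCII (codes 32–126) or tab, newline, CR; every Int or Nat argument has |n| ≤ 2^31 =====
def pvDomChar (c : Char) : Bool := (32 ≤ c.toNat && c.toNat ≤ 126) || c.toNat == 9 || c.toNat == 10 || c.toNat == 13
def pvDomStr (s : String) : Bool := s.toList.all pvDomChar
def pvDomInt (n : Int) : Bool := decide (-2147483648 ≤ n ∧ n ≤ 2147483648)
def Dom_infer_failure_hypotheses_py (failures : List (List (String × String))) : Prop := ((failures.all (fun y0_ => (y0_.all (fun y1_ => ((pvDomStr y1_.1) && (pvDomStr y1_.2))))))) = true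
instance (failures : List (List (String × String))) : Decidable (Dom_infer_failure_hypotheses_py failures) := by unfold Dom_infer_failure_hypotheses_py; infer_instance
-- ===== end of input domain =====

-- B replaces A's single joined lowercase blob by a one-pass loop over events with per-category
-- boolean flags (alternative decomposition, same asymptotic cost).


-- the four hypothesis strings (identical literals in both Pythons)
def pvPerfMsg : String := "Hipótese: gargalo de desempenho/timeout; reduzir tamanho de lote e incluir retry exponencial."
def pvAuthMsg : String := "Hipótese: falha de autenticação/permissão; validar credenciais e escopos antes da execução."
def pvSchemaMsg : String := "Hipótese: inconsistência de contrato/dados; aplicar validação de schema e normalização de payload."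
def pvGenericMsg : String := "Hipótese: falha sistêmica genérica; ativar diagnóstico incremental por etapas para isolar causa raiz."

-- (str(event.get("mission","")) + " " + str(event.get("status","")) + " " + str(event.get("error",""))).lower()
-- string concatenation is exactly List Char append; str() of a str is the identity; shared literal expression of both Pythons
def pvEventText (e : List (String × String)) : List Char :=
  PySem.Chars.lower
    (((PySem.Dict.mk e).getD "mission" "").toList ++ ' ' ::
     (((PySem.Dict.mk e).getD "status" "").toList ++ ' ' ::
      ((PySem.Dict.mk e).getD "error" "").toList))

-- ===== PORT A =====
def infer_failure_hypotheses_py (failures : List (List (String × String))) : List String :=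
  let failure_blob : List Char := PySem.Chars.join [' '] (failures.map pvEventText)
  if failure_blob = [] then []
  else
    let hypotheses : List String := []
    let hypotheses := if PySem.Chars.isIn "latency".toList failure_blob || PySem.Chars.isIn "timeout".toList failure_blob then hypotheses ++ [pvPerfMsg] else hypotheses
    let hypotheses := if PySem.Chars.isIn "auth".toList failure_blob || PySem.Chars.isIn "token".toList failure_blob || PySem.Chars.isIn "permission".toList failure_blob then hypotheses ++ [pvAuthMsg] else hypotheses
    let hypotheses := if PySem.Chars.isIn "schema".toList failure_blob || PySem.Chars.isIn "json".toList failure_blob || PySem.Chars.isIn "parse".toList failure_blob then hypotheses ++ [pvSchemaMsg] else hypotheses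
    if hypotheses = [] then [pvGenericMsg] else hypotheses

-- ===== PORT B =====
-- one pass over the events, three category flags
def infer_failure_hypotheses_py_alt (failures : List (List (String × String))) : List String :=
  match failures with
  | [] => []
  | _ :: _ =>
    let st : Bool × Bool × Bool :=
      failures.foldl (fun (st : Bool × Bool × Bool) e =>
        let text := pvEventText e
        (st.1 || PySem.Chars.isIn "latency".toList text || PySem.Chars.isIn "timeout".toList text,
         st.2.1 || PySem.Chars.isIn "auth".toList text || PySem.Chars.isIn "token".toList text || PySem.Chars.isIn "permission".toList text,
         st.2.2 || PySem.Chars.isIn "schema".toList text || PySem.Chars.isIn "json".toList text || PySem.Chars.isIn "parse".toList text))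
        (false, false, false)
    let out : List String :=
      (if st.1 then [pvPerfMsg] else []) ++
      (if st.2.1 then [pvAuthMsg] else []) ++
      (if st.2.2 then [pvSchemaMsg] else [])
    if out = [] then [pvGenericMsg] else out

-- ===== PRECONDITION & SPEC =====
def Spec_infer_failure_hypotheses_py (failures : List (List (String × String))) (out : List String) : Prop := out = infer_failure_hypotheses_py_alt failures
instance (failures : List (List (String × String))) (out : List String) : Decidable (Spec_infer_failure_hypotheses_py failures out) := by unfold Spec_infer_failure_hypotheses_py; infer_instance

-- ===== CLAIM (what is proved, stated in full; the proofs are below) =====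
def Claim_equal_infer_failure_hypotheses_py : Prop := ∀ (failures : List (List (String × String))), Dom_infer_failure_hypotheses_py failures → Spec_infer_failure_hypotheses_py failures (infer_failure_hypotheses_py failures)

-- ===== LEMMAS AND PROOFS =====

-- a space-free keyword that is a prefix-plus-tail of a ++ ' ' :: b is a prefix of a
theorem pv_prefix_of_concat (kw : List Char) (hsp : ' ' ∉ kw) :
    ∀ (a t b : List Char), kw ++ t = a ++ ' ' :: b → kw <+: a := by
  induction kw with
  | nil => intro a t b _; exact List.nil_prefix
  | cons c kw' ih =>
    intro a t b h
    cases a with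
    | nil =>
      simp at h
      exact absurd (h.1 ▸ List.mem_cons_self) hsp
    | cons x a' =>
      simp at h
      obtain ⟨hc, h'⟩ := h
      have := ih (fun hm => hsp (List.mem_cons_of_mem _ hm)) a' t b h'
      exact hc ▸ List.cons_prefix_cons.mpr ⟨rfl, this⟩

-- splitting an infix test over a single separating space
theorem pv_infix_split (kw a b : List Char) (hsp : ' ' ∉ kw) :
    kw <:+: (a ++ ' ' :: b) ↔ (kw <:+: a ∨ kw <:+: b) := by
  constructor
  · rintro ⟨s, t, hst⟩
    induction s generalizing a with
    | nil =>
      cases a with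
      | nil =>
        simp at hst
        cases kw with
        | nil => exact Or.inl (List.nil_infix)
        | cons c kw' =>
          simp at hst
          exact absurd (hst.1 ▸ List.mem_cons_self) hsp
      | cons x a' =>
        simp only [List.nil_append] at hst
        exact Or.inl ((pv_prefix_of_concat kw hsp (x :: a') t b hst).isInfix)
    | cons x s' ih =>
      cases a with
      | nil =>
        simp at hst
        exact Or.inr ⟨s', t, by simpa using hst.2⟩
      | cons y a' =>
        simp at hst
        rcases ih a' (by simpa using hst.2) with h | h
        · exact Or.inl (h.trans ⟨[y], [], by simp⟩)
        · exact Or.inr h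
  · rintro (h | h)
    · exact h.trans ⟨[], ' ' :: b, by simp⟩
    · exact h.trans ⟨a ++ [' '], [], by simp⟩

-- a space-free nonempty keyword is in the " "-join iff it is in one of the parts
theorem pv_infix_join (kw : List Char) (hsp : ' ' ∉ kw) (hne : kw ≠ []) :
    ∀ (parts : List (List Char)), kw <:+: PySem.Chars.join [' '] parts ↔ ∃ p ∈ parts, kw <:+: p := by
  intro parts
  induction parts with
  | nil =>
    simp [PySem.Chars.join, List.intercalate]
    exact hne
  | cons p ps ih =>
    cases ps with
    | nil => simp [PySem.Chars.join, List.intercalate, List.intersperse]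
    | cons q ps' =>
      have hjoin : PySem.Chars.join [' '] (p :: q :: ps') = p ++ ' ' :: PySem.Chars.join [' '] (q :: ps') := by
        simp [PySem.Chars.join, List.intercalate, List.intersperse]
      rw [hjoin, pv_infix_split kw p _ hsp, ih]
      simp

-- Bool form, through map pvEventText
theorem pv_isIn_join (kw : List Char) (hsp : ' ' ∉ kw) (hne : kw ≠ []) (failures : List (List (String × String))) :
    PySem.Chars.isIn kw (PySem.Chars.join [' '] (failures.map pvEventText)) =
      failures.any (fun e => PySem.Chars.isIn kw (pvEventText e)) := by
  rw [Bool.eq_iff_iff, PySem.Chars.isIn_iff_infix, pv_infix_join kw hsp hne, List.any_eq_true]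
  simp [PySem.Chars.isIn_iff_infix]

theorem pv_any_or {α : Type} (l : List α) (p q : α → Bool) :
    l.any (fun x => p x || q x) = (l.any p || l.any q) := by
  induction l with
  | nil => simp
  | cons x l ih => simp [List.any_cons, ih, Bool.or_assoc, Bool.or_left_comm]

-- the blob of a nonempty failure list is nonempty (each per-event text contains two spaces)
theorem pv_blob_ne_nil (e : List (String × String)) (rest : List (List (String × String))) :
    PySem.Chars.join [' '] ((e :: rest).map pvEventText) ≠ [] := by
  have hte : pvEventText e ≠ [] := by
    simp [pvEventText, PySem.Chars.lower]
  cases rest with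
  | nil => simpa [PySem.Chars.join, List.intercalate, List.intersperse] using hte
  | cons q ps =>
    simp only [List.map_cons]
    intro h
    rw [show PySem.Chars.join [' '] (pvEventText e :: pvEventText q :: ps.map pvEventText)
          = pvEventText e ++ ' ' :: PySem.Chars.join [' '] (pvEventText q :: ps.map pvEventText) by
        simp [PySem.Chars.join, List.intercalate, List.intersperse]] at h
    simp at h

-- B's fold computes the three any's
theorem pv_fold_flags (l : List (List (String × String))) :
    ∀ (b1 b2 b3 : Bool),
      (l.foldl (fun (st : Bool × Bool × Bool) e =>
        let text := pvEventText e
        (st.1 || PySem.Chars.isIn "latency".toList text || PySem.Chars.isIn "timeout".toList text,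
         st.2.1 || PySem.Chars.isIn "auth".toList text || PySem.Chars.isIn "token".toList text || PySem.Chars.isIn "permission".toList text,
         st.2.2 || PySem.Chars.isIn "schema".toList text || PySem.Chars.isIn "json".toList text || PySem.Chars.isIn "parse".toList text))
        (b1, b2, b3)) =
      (b1 || l.any (fun e => PySem.Chars.isIn "latency".toList (pvEventText e) || PySem.Chars.isIn "timeout".toList (pvEventText e)),
       b2 || l.any (fun e => PySem.Chars.isIn "auth".toList (pvEventText e) || PySem.Chars.isIn "token".toList (pvEventText e) || PySem.Chars.isIn "permission".toList (pvEventText e)),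
       b3 || l.any (fun e => PySem.Chars.isIn "schema".toList (pvEventText e) || PySem.Chars.isIn "json".toList (pvEventText e) || PySem.Chars.isIn "parse".toList (pvEventText e))) := by
  induction l with
  | nil => simp
  | cons e rest ih =>
    intro b1 b2 b3
    simp only [List.foldl_cons, List.any_cons]
    rw [ih]
    simp [Bool.or_assoc]

-- ===== VERDICT (by name: the statement is the Claim_ definition above) =====
theorem infer_failure_hypotheses_py_spec : Claim_equal_infer_failure_hypotheses_py := by
  intro failures _
  show infer_failure_hypotheses_py failures = infer_failure_hypotheses_py_alt failures
  cases failures with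
  | nil => rfl
  | cons e rest =>
    unfold infer_failure_hypotheses_py infer_failure_hypotheses_py_alt
    simp only [pv_fold_flags, Bool.false_or]
    rw [if_neg (pv_blob_ne_nil e rest)]
    rw [pv_isIn_join "latency".toList (by decide) (by decide),
        pv_isIn_join "timeout".toList (by decide) (by decide),
        pv_isIn_join "auth".toList (by decide) (by decide),
        pv_isIn_join "token".toList (by decide) (by decide),
        pv_isIn_join "permission".toList (by decide) (by decide),
        pv_isIn_join "schema".toList (by decide) (by decide),
        pv_isIn_join "json".toList (by decide) (by decide),
        pv_isIn_join "parse".toList (by decide) (by decide)]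
    rw [← pv_any_or, ← pv_any_or, ← pv_any_or, ← pv_any_or, ← pv_any_or]
    rcases h1 : (e :: rest).any (fun x => PySem.Chars.isIn "latency".toList (pvEventText x) || PySem.Chars.isIn "timeout".toList (pvEventText x)) <;>
    rcases h2 : (e :: rest).any (fun x => PySem.Chars.isIn "auth".toList (pvEventText x) || PySem.Chars.isIn "token".toList (pvEventText x) || PySem.Chars.isIn "permission".toList (pvEventText x)) <;>
    rcases h3 : (e :: rest).any (fun x => PySem.Chars.isIn "schema".toList (pvEventText x) || PySem.Chars.isIn "json".toList (pvEventText x) || PySem.Chars.isIn "parse".toList (pvEventText x)) <;>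
    simp [pvPerfMsg, pvAuthMsg, pvSchemaMsg]
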